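-- pv_equiv track=rewrite | github.com/ekhusainov/codeforces_archive_tasks | task0088.py | unioun_max_min
-- ===== SOURCE A (Python) =====
-- def unioun_max_min(arr1, arr2):
--     len1 = len(arr1)
--     len2 = len(arr2)
--     result = []
--     if len1 > len2:
--         for i in range(len2):
--             result.append(arr1[i])
--             result.append(arr2[i])
--         result.append(arr1[len1 - 1])
--     elif len1 == len2:
--         for i in range(len2):
--             result.append(arr1[i])
--             result.append(arr2[i])
--     else:
--         for i in range(len1):
--             result.append(arr2[i])
--             result.append(arr1[i])
--         result.append(arr2[len2 - 1])
--     return result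
-- ===== SOURCE B (Python) =====
-- def unioun_max_min(arr1, arr2):
--     # Divide and conquer: pick the leader once, trim it to the follower's
--     # length, interleave the two equal-length halves recursively, then attach
--     # the leader's last element when the lengths differ.
--     long_, short_ = (arr1, arr2) if len(arr1) >= len(arr2) else (arr2, arr1)
--     n = len(short_)
--
--     def go(lg, sh):  # len(lg) == len(sh)
--         if len(sh) <= 1:
--             return [lg[0], sh[0]] if sh else []
--         m = len(sh) // 2
--         return go(lg[:m], sh[:m]) + go(lg[m:], sh[m:])
--
--     out = go(long_[:n], short_)
--     if len(long_) > n: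
--         out.append(long_[-1])
--     return out
-- ===== Notes on version B (the rewrite author's own statement) =====
-- stated objective: alternative
-- what changed: Replaces A's three index-counting append loops by a leader/follower selection followed by a divide-and-conquer interleave that splits both equal-length lists in half and concatenates the recursively interleaved halves, attaching the leader's last element when lengths differ.
import Mathlib
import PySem

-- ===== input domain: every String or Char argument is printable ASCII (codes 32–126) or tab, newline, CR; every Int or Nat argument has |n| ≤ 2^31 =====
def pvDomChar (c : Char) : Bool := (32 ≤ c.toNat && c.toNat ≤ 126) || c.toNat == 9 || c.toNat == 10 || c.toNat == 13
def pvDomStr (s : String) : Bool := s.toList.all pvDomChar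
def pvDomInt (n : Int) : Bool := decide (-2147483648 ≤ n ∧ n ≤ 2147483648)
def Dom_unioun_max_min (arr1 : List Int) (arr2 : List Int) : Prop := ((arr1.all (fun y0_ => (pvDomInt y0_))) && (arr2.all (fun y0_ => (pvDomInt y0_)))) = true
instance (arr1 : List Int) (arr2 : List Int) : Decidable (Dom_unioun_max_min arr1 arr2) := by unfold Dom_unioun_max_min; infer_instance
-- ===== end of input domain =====

-- B replaces A's three index-counting loops by one leader selection plus a
-- divide-and-conquer interleave of the two equal-length prefixes (objective: alternative).

-- ===== PORT A =====
-- the for-loops 'for i in range(n): result.append(a[i]); result.append(b[i])' (indices always in range)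
def pvLoopA (a b : List Int) (n : Nat) : List Int :=
  (List.range n).foldl (fun res i => res ++ [a.getD i 0, b.getD i 0]) []

def unioun_max_min (arr1 : List Int) (arr2 : List Int) : List Int :=
  let len1 := arr1.length
  let len2 := arr2.length
  if len1 > len2 then
    pvLoopA arr1 arr2 len2 ++ [arr1.getD (len1 - 1) 0]   -- arr1[len1-1], in range since len1 > len2 ≥ 0
  else if len1 = len2 then
    pvLoopA arr1 arr2 len2
  else
    pvLoopA arr2 arr1 len1 ++ [arr2.getD (len2 - 1) 0]   -- arr2[len2-1], in range since len2 > len1 ≥ 0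

-- ===== PORT B =====
-- Source B's inner 'go', always called with len(lg) == len(sh); lg[0] is then in range,
-- ported as getD (a comment in Source B states the invariant)
def pvGoBF (fuel : Nat) (lg sh : List Int) : List Int :=
  match fuel with
  | 0 => []   -- never reached: recursion depth is bounded by sh.length
  | f + 1 =>
    if sh.length ≤ 1 then
      if sh.isEmpty then [] else [lg.getD 0 0, sh.getD 0 0]
    else
      pvGoBF f (lg.take (sh.length / 2)) (sh.take (sh.length / 2)) ++
      pvGoBF f (lg.drop (sh.length / 2)) (sh.drop (sh.length / 2))

def pvGoB (lg sh : List Int) : List Int := pvGoBF sh.length lg sh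

def unioun_max_min_alt (arr1 : List Int) (arr2 : List Int) : List Int :=
  let p := if arr2.length ≤ arr1.length then (arr1, arr2) else (arr2, arr1)
  let n := p.2.length
  let out := pvGoB (p.1.take n) p.2
  if n < p.1.length then out ++ [(PySem.List.pyGet? p.1 (-1)).getD 0] else out

-- ===== PRECONDITION & SPEC =====
def Spec_unioun_max_min (arr1 : List Int) (arr2 : List Int) (out : List Int) : Prop := out = unioun_max_min_alt arr1 arr2
instance (arr1 : List Int) (arr2 : List Int) (out : List Int) : Decidable (Spec_unioun_max_min arr1 arr2 out) := by unfold Spec_unioun_max_min; infer_instance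

-- ===== CLAIM (what is proved, stated in full; the proofs are below) =====
def Claim_equal_unioun_max_min : Prop := ∀ (arr1 : List Int) (arr2 : List Int), Dom_unioun_max_min arr1 arr2 → Spec_unioun_max_min arr1 arr2 (unioun_max_min arr1 arr2)

-- ===== LEMMAS AND PROOFS =====
lemma pvLoopA_eq (a b : List Int) (n : Nat) (ha : n ≤ a.length) (hb : n ≤ b.length) :
    pvLoopA a b n = ((a.zip b).take n).flatMap (fun q => [q.1, q.2]) := by
  induction n with
  | zero => simp [pvLoopA]
  | succ k ih =>
    have hka : k < a.length := by omega
    have hkb : k < b.length := by omega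
    have hz : k < (a.zip b).length := by simp [List.length_zip]; omega
    have ihk := ih (by omega) (by omega)
    simp only [pvLoopA, List.range_succ, List.foldl_append, List.foldl_cons, List.foldl_nil]
    rw [show (List.range k).foldl (fun res i => res ++ [a.getD i 0, b.getD i 0]) [] = pvLoopA a b k from rfl, ihk]
    rw [List.take_add_one]
    simp [List.getElem?_eq_getElem hka, List.getElem?_eq_getElem hkb, List.getElem?_eq_getElem hz,
      List.getD, List.getElem_zip]

lemma pvLoop_full {a b : List Int} (h : b.length ≤ a.length) :
    pvLoopA a b b.length = (a.zip b).flatMap (fun q => [q.1, q.2]) := by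
  rw [pvLoopA_eq a b b.length h le_rfl, List.take_of_length_le (by simp [List.length_zip])]

lemma getD_last {a : List Int} (h : a ≠ []) :
    a.getD (a.length - 1) 0 = (PySem.List.pyGet? a (-1)).getD 0 := by
  rw [PySem.List.pyGet?_neg_one, List.getLast?_eq_getElem?]
  cases hlen : a.length with
  | zero => simp [List.eq_nil_of_length_eq_zero hlen] at h
  | succ k =>
    have hk : k < a.length := by omega
    simp [List.getD, hlen]

lemma zip_take_left (a b : List Int) : (a.take b.length).zip b = a.zip b := by
  induction b generalizing a with
  | nil => simp
  | cons x xs ih =>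
    cases a with
    | nil => simp
    | cons y ys => simp [List.take_succ_cons, ih]

lemma pvGoBF_eq : ∀ (fuel : Nat) (lg sh : List Int), sh.length ≤ fuel → lg.length = sh.length →
    pvGoBF fuel lg sh = (lg.zip sh).flatMap (fun q => [q.1, q.2]) := by
  intro fuel
  induction fuel with
  | zero =>
    intro lg sh hf hlen
    have hsh : sh = [] := List.eq_nil_of_length_eq_zero (by omega)
    have hlg : lg = [] := List.eq_nil_of_length_eq_zero (by omega)
    subst hsh; subst hlg; simp [pvGoBF]
  | succ f ih =>
    intro lg sh hf hlen
    rw [pvGoBF]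
    by_cases hle : sh.length ≤ 1
    · rw [if_pos hle]
      cases sh with
      | nil =>
        have : lg = [] := List.eq_nil_of_length_eq_zero (by simpa using hlen)
        subst this; simp
      | cons s ss =>
        have hss : ss = [] := List.eq_nil_of_length_eq_zero (by simp only [List.length_cons] at hle; omega)
        subst hss
        cases lg with
        | nil => simp at hlen
        | cons l ls =>
          have hls : ls = [] := List.eq_nil_of_length_eq_zero (by simpa using hlen)
          subst hls; simp
    · rw [if_neg hle]
      have h2 : 2 ≤ sh.length := by omega
      set m := sh.length / 2 with hm
      have hm1 : 1 ≤ m := by omega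
      have hmlt : m < sh.length := by omega
      rw [ih _ _ (by simp; omega) (by simp; omega), ih _ _ (by simp; omega) (by simp; omega),
        ← List.flatMap_append, ← List.zip_append (by simp; omega),
        List.take_append_drop, List.take_append_drop]

lemma pvGoB_eq (lg sh : List Int) (hlen : lg.length = sh.length) :
    pvGoB lg sh = (lg.zip sh).flatMap (fun q => [q.1, q.2]) :=
  pvGoBF_eq sh.length lg sh le_rfl hlen

-- ===== VERDICT (by name: the statement is the Claim_ definition above) =====
theorem unioun_max_min_spec : Claim_equal_unioun_max_min := by
  intro arr1 arr2 _
  unfold Spec_unioun_max_min unioun_max_min unioun_max_min_alt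
  by_cases h12 : arr2.length ≤ arr1.length
  · simp only [if_pos h12]
    have hout : pvGoB (arr1.take arr2.length) arr2
        = (arr1.zip arr2).flatMap (fun q => [q.1, q.2]) := by
      rw [pvGoB_eq _ _ (by simp; omega), zip_take_left]
    rw [hout]
    by_cases hgt : arr1.length > arr2.length
    · have hne : arr1 ≠ [] := by intro h; subst h; simp at hgt
      simp only [if_pos hgt]
      rw [pvLoop_full h12, getD_last hne]
    · have heq : arr1.length = arr2.length := by omega
      simp only [if_neg hgt, if_pos heq]
      exact pvLoop_full h12
  · have hlt : arr1.length < arr2.length := by omega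
    have hne : arr2 ≠ [] := by intro h; subst h; simp at hlt
    simp only [if_neg h12, if_neg (by omega : ¬ arr1.length > arr2.length),
      if_neg (by omega : ¬ arr1.length = arr2.length), if_pos hlt]
    have hout : pvGoB (arr2.take arr1.length) arr1
        = (arr2.zip arr1).flatMap (fun q => [q.1, q.2]) := by
      rw [pvGoB_eq _ _ (by simp; omega), zip_take_left]
    rw [hout, pvLoop_full (le_of_lt hlt), getD_last hne]
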